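-- pv_equiv track=rewrite | github.com/anselmobd/fo2 | src/systextil/queries/base.py | off_alias
-- ===== SOURCE A (Python) =====
-- def off_alias(fields):
--     new_fields = []
--     for field in map(str.strip, fields):
--         last_space = field.rfind(' ')
--         if last_space + 1:  # se last_space >= 0
--             alias_candidate = field[last_space+1:]
--             if alias_candidate.find('.') == -1:
--                 new_fields.append(field[:last_space].strip())
--                 continue
--         new_fields.append(field)
--     return new_fields
-- ===== SOURCE B (Python) =====
-- def off_alias(fields):
--     out = []
--     for f in fields:
--         s = str.strip(f)
--         parts = s.split(' ')
--         if len(parts) > 1 and '.' not in parts[-1]: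
--             out.append(' '.join(parts[:-1]).strip())
--         else:
--             out.append(s)
--     return out
-- ===== Notes on version B (the rewrite author's own statement) =====
-- stated objective: alternative
-- what changed: Instead of locating the last space with rfind and slicing around that index, B tokenizes each stripped field with s.split(' ') and decides from the token list: if there are at least two tokens and the last token has no dot, it rejoins all but the last token and strips it, otherwise it keeps the string.
import Mathlib
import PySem

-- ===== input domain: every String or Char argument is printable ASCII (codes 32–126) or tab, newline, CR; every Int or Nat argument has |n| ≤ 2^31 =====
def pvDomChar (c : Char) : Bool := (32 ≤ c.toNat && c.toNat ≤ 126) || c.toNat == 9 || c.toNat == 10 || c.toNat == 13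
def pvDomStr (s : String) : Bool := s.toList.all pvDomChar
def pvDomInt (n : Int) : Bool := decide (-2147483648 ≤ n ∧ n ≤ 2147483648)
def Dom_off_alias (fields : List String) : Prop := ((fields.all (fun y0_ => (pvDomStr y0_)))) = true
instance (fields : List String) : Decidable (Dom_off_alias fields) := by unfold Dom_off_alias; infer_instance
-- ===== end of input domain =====

-- B re-implements A by tokenizing each stripped field at spaces (split/join) instead of scanning for the last space index; same cost, alternative algorithm.


-- ===== PORT A =====
-- loop body of A: field = str.strip(f); last_space = field.rfind(' ');
-- if last_space+1: alias_candidate = field[last_space+1:];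
--   if alias_candidate.find('.') == -1: append field[:last_space].strip(); continue
-- append field
def offAliasAOne (f : String) : String :=
  let field := PySem.Chars.strip f.toList
  let last_space := PySem.Chars.rfind field [' ']
  if last_space + 1 ≠ 0 then
    let alias_candidate := PySem.Chars.slice field (some (last_space + 1)) none
    if PySem.Chars.find alias_candidate ['.'] = -1 then
      String.ofList (PySem.Chars.strip (PySem.Chars.slice field none (some last_space)))
    else String.ofList field
  else String.ofList field

-- new_fields = []; for field in map(str.strip, fields): … new_fields.append(…); return new_fields
def off_alias (fields : List String) : List String :=
  fields.foldl (fun new_fields f => new_fields ++ [offAliasAOne f]) []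

-- ===== PORT B =====
-- per-element step of Source B: s = str.strip(f); parts = s.split(' ');
-- if len(parts) > 1 and '.' not in parts[-1]: append ' '.join(parts[:-1]).strip() else append s
def offAliasAltOne (f : String) : String :=
  let s := PySem.Chars.strip f.toList
  let parts := PySem.Chars.splitOn s [' ']
  if 1 < parts.length ∧ '.' ∉ PySem.List.pyGetD parts (-1) [] then
    String.ofList (PySem.Chars.strip (PySem.Chars.join [' '] parts.dropLast))
  else String.ofList s

-- out = []; for f in fields: … out.append(…); return out
def off_alias_alt (fields : List String) : List String :=
  fields.foldl (fun out f => out ++ [offAliasAltOne f]) []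

-- ===== PRECONDITION & SPEC =====
def Spec_off_alias (fields : List String) (out : List String) : Prop := out = off_alias_alt fields
instance (fields : List String) (out : List String) : Decidable (Spec_off_alias fields out) := by unfold Spec_off_alias; infer_instance

-- ===== CLAIM (what is proved, stated in full; the proofs are below) =====
def Claim_equal_off_alias : Prop := ∀ (fields : List String), Dom_off_alias fields → Spec_off_alias fields (off_alias fields)

-- ===== LEMMAS AND PROOFS =====

-- reference splitter: split a character list at every space (always nonempty)
def split1 : List Char → List (List Char)
  | [] => [[]]
  | c :: rest => if c = ' ' then [] :: split1 rest else
      match split1 rest with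
      | [] => [[c]]
      | x :: xs => (c :: x) :: xs

theorem split1_ne_nil (s : List Char) : split1 s ≠ [] := by
  cases s with
  | nil => simp [split1]
  | cons c rest =>
    simp only [split1]
    split_ifs
    · simp
    · cases h : split1 rest <;> simp

-- prepend a prefix onto the first piece
def consHead (p : List Char) : List (List Char) → List (List Char)
  | [] => [p]
  | x :: xs => (p ++ x) :: xs

theorem consHead_nil_of_ne (parts : List (List Char)) (h : parts ≠ []) :
    consHead [] parts = parts := by
  cases parts with
  | nil => exact absurd rfl h
  | cons x xs => simp [consHead]

theorem consHead_consHead (p q : List Char) (parts : List (List Char)) :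
    consHead p (consHead q parts) = consHead (p ++ q) parts := by
  cases parts <;> simp [consHead]

theorem split1_cons_space (rest : List Char) :
    split1 (' ' :: rest) = [] :: split1 rest := by
  simp [split1]

theorem split1_cons_of_ne (c : Char) (rest : List Char) (h : c ≠ ' ') :
    split1 (c :: rest) = consHead [c] (split1 rest) := by
  simp only [split1, if_neg h]
  cases hr : split1 rest <;> simp [consHead]

-- [c] is a prefix of xs iff xs starts with c
theorem singleton_isPrefixOf {c : Char} {xs : List Char} :
    [c].isPrefixOf xs = true ↔ xs.head? = some c := by
  cases xs with
  | nil => simp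
  | cons a t =>
    show (c == a && true) = true ↔ some a = some c
    rw [Bool.and_true, beq_iff_eq, Option.some_inj]
    exact eq_comm

-- splitOn.go with enough fuel computes acc.reverse ++ (cur.reverse merged onto split1 l)
theorem splitOn_go_spec (fuel : Nat) :
    ∀ (l cur : List Char) (acc : List (List Char)), l.length ≤ fuel →
    PySem.Chars.splitOn.go [' '] fuel l cur acc = acc.reverse ++ consHead cur.reverse (split1 l) := by
  induction fuel with
  | zero =>
    intro l cur acc hl
    have : l = [] := List.eq_nil_of_length_eq_zero (Nat.le_zero.mp hl)
    subst this
    simp [PySem.Chars.splitOn.go, split1, consHead]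
  | succ n ih =>
    intro l cur acc hl
    cases l with
    | nil => simp [PySem.Chars.splitOn.go, split1, consHead]
    | cons c rest =>
      rw [PySem.Chars.splitOn.go.eq_def]
      simp only []
      by_cases hc : c = ' '
      · subst hc
        rw [if_pos (singleton_isPrefixOf.mpr rfl)]
        have : List.drop [' '].length (' ' :: rest) = rest := by simp
        rw [this, ih rest [] (cur.reverse :: acc) (by simpa using Nat.le_of_succ_le_succ hl),
          split1_cons_space]
        simp only [List.reverse_nil]
        rw [consHead_nil_of_ne _ (split1_ne_nil rest)]
        simp [consHead]
      · have hnp : ¬ ([' '].isPrefixOf (c :: rest) = true) := by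
          intro hp
          have h2 : (c :: rest).head? = some ' ' := singleton_isPrefixOf.mp hp
          simp only [List.head?_cons, Option.some_inj] at h2
          exact hc h2
        have hle : rest.length ≤ n := by simpa using Nat.le_of_succ_le_succ hl
        rw [if_neg hnp, ih rest (c :: cur) acc hle]
        rw [split1_cons_of_ne c rest hc, consHead_consHead]
        simp

theorem splitOn_space_eq_split1 (s : List Char) :
    PySem.Chars.splitOn s [' '] = split1 s := by
  unfold PySem.Chars.splitOn
  rw [splitOn_go_spec (s.length + 1) s [] [] (by omega)]
  simp [consHead_nil_of_ne _ (split1_ne_nil s)]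

-- splitting distributes over the last space
theorem split1_append_space (a t : List Char) :
    split1 (a ++ ' ' :: t) = split1 a ++ split1 t := by
  induction a with
  | nil => simp [split1]
  | cons c a' ih =>
    by_cases hc : c = ' '
    · subst hc
      rw [List.cons_append, split1_cons_space, split1_cons_space, ih, List.cons_append]
    · rw [List.cons_append, split1_cons_of_ne c _ hc, ih, split1_cons_of_ne c a' hc]
      obtain ⟨x, xs, hx⟩ := List.exists_cons_of_ne_nil (split1_ne_nil a')
      rw [hx]
      simp [consHead]

theorem split1_no_space (s : List Char) (h : ' ' ∉ s) : split1 s = [s] := by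
  induction s with
  | nil => simp [split1]
  | cons c rest ih =>
    have hc : c ≠ ' ' := fun he => h (he ▸ List.mem_cons_self)
    rw [split1_cons_of_ne c rest hc, ih (fun hm => h (List.mem_cons_of_mem c hm))]
    simp [consHead]

theorem join_split1 (a : List Char) : PySem.Chars.join [' '] (split1 a) = a := by
  induction a with
  | nil => simp [split1, PySem.Chars.join_singleton]
  | cons c a' ih =>
    by_cases hc : c = ' '
    · subst hc
      rw [split1_cons_space]
      obtain ⟨x, xs, hx⟩ := List.exists_cons_of_ne_nil (split1_ne_nil a')
      rw [hx] at ih ⊢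
      rw [PySem.Chars.join_cons_cons, ih]
      simp
    · rw [split1_cons_of_ne c a' hc]
      obtain ⟨x, xs, hx⟩ := List.exists_cons_of_ne_nil (split1_ne_nil a')
      rw [hx] at ih ⊢
      cases xs with
      | nil =>
        simp only [consHead, PySem.Chars.join_singleton] at ih ⊢
        simp [ih]
      | cons y ys =>
        simp only [consHead] at ih ⊢
        rw [PySem.Chars.join_cons_cons] at ih ⊢
        simp [← ih]

-- rfind.go returns -1 when c occurs nowhere in s
theorem rfind_go_not_mem (c : Char) (s : List Char) (h : c ∉ s) :
    ∀ k, PySem.Chars.rfind.go s [c] k = -1 := by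
  intro k
  induction k with
  | zero =>
    simp only [PySem.Chars.rfind.go]
    rw [if_neg]
    intro hp
    exact h (List.mem_of_mem_head? (Option.mem_def.mpr (singleton_isPrefixOf.mp hp)))
  | succ j ih =>
    simp only [PySem.Chars.rfind.go]
    rw [if_neg, ih]
    intro hp
    have hhd := singleton_isPrefixOf.mp hp
    exact h (List.mem_of_mem_drop (List.mem_of_mem_head? (Option.mem_def.mpr hhd)))

theorem rfind_singleton_not_mem (c : Char) (s : List Char) (h : c ∉ s) :
    PySem.Chars.rfind s [c] = -1 :=
  rfind_go_not_mem c s h _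

-- rfind finds the LAST occurrence: in a ++ c :: t with c ∉ t it is a.length
theorem rfind_go_last (c : Char) (a t : List Char) (h : c ∉ t) :
    ∀ k, a.length ≤ k → PySem.Chars.rfind.go (a ++ c :: t) [c] k = (a.length : Int) := by
  intro k hk
  induction k with
  | zero =>
    have ha : a = [] := by
      cases a with
      | nil => rfl
      | cons x xs => simp at hk
    subst ha
    simp only [PySem.Chars.rfind.go, List.nil_append]
    rw [if_pos (singleton_isPrefixOf.mpr rfl)]
    simp
  | succ j ih =>
    simp only [PySem.Chars.rfind.go]
    by_cases hj : a.length = j + 1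
    · rw [if_pos]
      · exact_mod_cast hj.symm
      · apply singleton_isPrefixOf.mpr
        rw [← hj, List.drop_left]
        rfl
    · have hle : a.length ≤ j := by omega
      rw [if_neg, ih hle]
      intro hp
      have hhd := singleton_isPrefixOf.mp hp
      have hdrop : (a ++ c :: t).drop (j + 1) = (c :: t).drop (j + 1 - a.length) := by
        have he : j + 1 = a.length + (j + 1 - a.length) := by omega
        rw [he, List.drop_append]
        simp
      have hm : c ∈ (c :: t).drop (j + 1 - a.length) :=
        List.mem_of_mem_head? (Option.mem_def.mpr (by rw [← hdrop]; exact hhd))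
      have hsuf : (c :: t).drop (j + 1 - a.length) <:+ t := by
        have he : j + 1 - a.length = (j - a.length) + 1 := by omega
        rw [he, List.drop_succ_cons]
        exact List.drop_suffix _ _
      exact h (hsuf.mem hm)

theorem rfind_singleton_last (c : Char) (a t : List Char) (h : c ∉ t) :
    PySem.Chars.rfind (a ++ c :: t) [c] = (a.length : Int) := by
  apply rfind_go_last c a t h
  simp

-- singleton infix is membership
theorem singleton_infix_iff (c : Char) (t : List Char) : [c] <:+: t ↔ c ∈ t := by
  constructor
  · intro h; exact h.mem List.mem_cons_self
  · intro h
    obtain ⟨u, v, rfl⟩ := List.mem_iff_append.mp h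
    exact ⟨u, v, by simp⟩

-- the head dropWhile stops at fails the predicate
theorem dropWhile_eq_cons_false {α : Type} (p : α → Bool) (l : List α) (d : α) (rest : List α)
    (h : l.dropWhile p = d :: rest) : p d = false := by
  induction l with
  | nil => simp at h
  | cons x xs ih =>
    by_cases hx : p x = true
    · rw [List.dropWhile_cons_of_pos hx] at h
      exact ih h
    · rw [List.dropWhile_cons_of_neg hx] at h
      cases h
      simpa using hx

-- per-element agreement of the two ports
theorem one_step_eq (f : String) : offAliasAOne f = offAliasAltOne f := by
  dsimp only [offAliasAOne, offAliasAltOne]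
  generalize PySem.Chars.strip f.toList = s
  rw [splitOn_space_eq_split1]
  by_cases hsp : ' ' ∈ s
  · -- there is a space: split s at its LAST space, s = a ++ ' ' :: t with ' ' ∉ t
    have hne : s.reverse.dropWhile (fun c => decide (c ≠ ' ')) ≠ [] := by
      intro h0
      rw [List.dropWhile_eq_nil_iff] at h0
      have := h0 ' ' (List.mem_reverse.mpr hsp)
      simp at this
    obtain ⟨d, headR, hdw⟩ := List.exists_cons_of_ne_nil hne
    have hd : d = ' ' := by
      have := dropWhile_eq_cons_false _ _ _ _ hdw
      simpa using this
    subst hd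
    have hsplit : s = headR.reverse ++ ' ' :: (s.reverse.takeWhile (fun c => decide (c ≠ ' '))).reverse := by
      have h0 : s.reverse.takeWhile (fun c => decide (c ≠ ' ')) ++ ' ' :: headR = s.reverse := by
        conv_rhs => rw [← List.takeWhile_append_dropWhile (p := fun c => decide (c ≠ ' ')) (l := s.reverse)]
        rw [hdw]
      calc s = s.reverse.reverse := (s.reverse_reverse).symm
        _ = (s.reverse.takeWhile (fun c => decide (c ≠ ' ')) ++ ' ' :: headR).reverse := by rw [h0]
        _ = headR.reverse ++ ' ' :: (s.reverse.takeWhile (fun c => decide (c ≠ ' '))).reverse := by simp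
    generalize ht0 : (s.reverse.takeWhile (fun c => decide (c ≠ ' '))).reverse = t at hsplit
    have hnt : ' ' ∉ t := by
      rw [← ht0]
      intro hmem
      have := List.mem_takeWhile_imp (List.mem_reverse.mp hmem)
      simp at this
    -- A side: rfind is the length of the head, slices are head and tail
    have hrf : PySem.Chars.rfind s [' '] = (headR.reverse.length : Int) := by
      conv_lhs => rw [hsplit]
      exact rfind_singleton_last ' ' _ _ hnt
    rw [hrf]
    rw [if_pos (by omega : ((headR.reverse.length : Int)) + 1 ≠ 0)]
    have hslice1 : PySem.Chars.slice s (some ((headR.reverse.length : Int) + 1)) none = t := by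
      have hdrop : s.drop (headR.reverse.length + 1) = t := by
        conv_lhs => rw [hsplit]
        rw [List.drop_append]
        simp
      have hc : ((headR.reverse.length : Int) + 1) = ((headR.reverse.length + 1 : Nat) : Int) := by push_cast; ring
      rw [PySem.Chars.slice_eq_listSlice, hc, PySem.List.slice_from_natCast]
      exact hdrop
    have hslice2 : PySem.Chars.slice s none (some (headR.reverse.length : Int)) = headR.reverse := by
      have htake : s.take headR.reverse.length = headR.reverse := by
        conv_lhs => rw [hsplit]
        exact List.take_left' rfl
      rw [PySem.Chars.slice_eq_listSlice, PySem.List.slice_to_natCast]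
      exact htake
    rw [hslice1, hslice2]
    -- B side: parts = split1 headR.reverse ++ [t]
    have hparts : split1 s = split1 headR.reverse ++ [t] := by
      rw [hsplit, split1_append_space, split1_no_space t hnt]
    rw [hparts]
    have hlast : PySem.List.pyGetD (split1 headR.reverse ++ [t]) (-1) [] = t := by
      simp [PySem.List.pyGetD, PySem.List.pyGet?, PySem.List.pyIdx?]
    have hlen : 1 < (split1 headR.reverse ++ [t]).length := by
      obtain ⟨x, xs, hx⟩ := List.exists_cons_of_ne_nil (split1_ne_nil headR.reverse)
      rw [hx]; simp
    by_cases hdot : '.' ∈ t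
    · have hA : ¬ PySem.Chars.find t ['.'] = -1 := by
        rw [PySem.Chars.find_eq_neg_one_iff, singleton_infix_iff]
        exact not_not_intro hdot
      rw [if_neg hA, if_neg (by rw [hlast]; exact fun hb => hb.2 hdot)]
    · have hA : PySem.Chars.find t ['.'] = -1 := by
        rw [PySem.Chars.find_eq_neg_one_iff, singleton_infix_iff]
        exact hdot
      rw [if_pos hA, if_pos (by rw [hlast]; exact ⟨hlen, hdot⟩)]
      rw [List.dropLast_concat, join_split1]
  · -- no space: both keep s
    have h1 : PySem.Chars.rfind s [' '] = -1 := rfind_singleton_not_mem _ _ hsp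
    have h2 : split1 s = [s] := split1_no_space s hsp
    rw [h1, h2]
    simp

-- ===== VERDICT (by name: the statement is the Claim_ definition above) =====
theorem off_alias_spec : Claim_equal_off_alias := by
  intro fields _
  unfold Spec_off_alias off_alias off_alias_alt
  rw [PySem.List.foldl_append_singleton_eq_map, PySem.List.foldl_append_singleton_eq_map]
  exact List.map_congr_left (fun f _ => one_step_eq f)
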